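-- pv_equiv track=rewrite | github.com/vgcarlol/Generador-de-Analizadores-Lexicos | src/yalex_generator.py | convert_set
-- ===== SOURCE A (Python) =====
-- def extract_quoted_tokens(inner):
--     tokens = []
--     i = 0
--     while i < len(inner):
--         if inner[i] in ("'", '"'):
--             quote = inner[i]
--             i += 1
--             start = i
--             while i < len(inner) and inner[i] != quote:
--                 i += 1
--             token = inner[start:i]
--             tokens.append(token)
--             i += 1
--         else:
--             i += 1
--     return tokens
--
-- def convert_set(def_str):
--     def_str = def_str.strip()
--     if def_str.startswith('[') and def_str.endswith(']'):
--         inner = def_str[1:-1].strip()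
--         tokens = extract_quoted_tokens(inner)
--         if tokens:
--             if len(tokens) >= 2 and len(tokens) % 2 == 0:
--                 ranges = []
--                 for i in range(0, len(tokens), 2):
--                     start = tokens[i]
--                     end = tokens[i+1]
--                     ranges.append(f"{start}-{end}")
--                 return "[" + "".join(ranges) + "]"
--             else:
--                 return "[" + "".join(tokens) + "]"
--         else:
--             return "[" + inner.replace(" ", "") + "]"
--     return def_str
-- ===== SOURCE B (Python) =====
-- def pair_ranges(tokens):
--     if not tokens:
--         return []
--     return [tokens[0] + '-' + tokens[1]] + pair_ranges(tokens[2:])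
--
-- def convert_set(def_str):
--     s = def_str.strip()
--     if not (s.startswith('[') and s.endswith(']')):
--         return s
--     inner = s[1:-1].strip()
--     tokens = []
--     cur = None  # (quote char, chars collected so far) while inside a quoted token
--     for c in inner:
--         if cur is None:
--             if c in "'\"":
--                 cur = (c, [])
--         elif c == cur[0]:
--             tokens.append(''.join(cur[1]))
--             cur = None
--         else:
--             cur[1].append(c)
--     if cur is not None:  # an unterminated final quote still yields a token
--         tokens.append(''.join(cur[1]))
--     if not tokens:
--         return '[' + inner.replace(' ', '') + ']'
--     if len(tokens) % 2 == 1: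
--         return '[' + ''.join(tokens) + ']'
--     return '[' + ''.join(pair_ranges(tokens)) + ']'
-- ===== Notes on version B (the rewrite author's own statement) =====
-- stated objective: alternative
-- what changed: Replaces the nested index-based while loops that scan for closing quotes with a single-pass character state machine (current open quote + accumulated chars), and replaces the range(0,len,2) index loop with structural recursion pairing tokens two at a time.
import Mathlib
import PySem

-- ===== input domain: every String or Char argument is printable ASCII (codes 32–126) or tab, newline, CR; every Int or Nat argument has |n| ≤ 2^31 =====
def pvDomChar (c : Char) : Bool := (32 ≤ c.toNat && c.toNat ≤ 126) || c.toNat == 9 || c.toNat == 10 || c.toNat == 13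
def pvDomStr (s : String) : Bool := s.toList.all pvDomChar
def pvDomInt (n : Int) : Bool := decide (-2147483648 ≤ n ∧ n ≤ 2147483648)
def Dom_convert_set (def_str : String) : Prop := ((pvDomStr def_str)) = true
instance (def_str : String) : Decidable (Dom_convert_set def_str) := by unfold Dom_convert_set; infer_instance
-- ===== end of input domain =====

-- B replaces A's nested index-based quote scanning by a one-pass state machine and the
-- range(0,len,2) pairing loop by structural two-at-a-time recursion (objective: alternative).

-- ===== PORT A =====
-- inner while loop: advance i until inner[i] == quote (or end); returns the final i
def scanClose (inner : List Char) (q : Char) (k : Nat) : Nat :=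
  if h : k < inner.length then
    if inner[k] = q then k else scanClose inner q (k + 1)
  else k
termination_by inner.length - k
decreasing_by exact Nat.sub_succ_lt_self inner.length k h

-- needed by extractLoop's termination proof
theorem scanClose_ge (inner : List Char) (q : Char) (k : Nat) : k ≤ scanClose inner q k := by
  fun_induction scanClose inner q k with
  | case1 => omega
  | case2 k h hne ih => omega
  | case3 => omega

-- outer while loop of extract_quoted_tokens; index i is a Nat (Python's i stays ≥ 0);
-- inner[start:i] is ported as drop/take, exact for these in-range nonnegative bounds
def extractLoop (inner : List Char) (i : Nat) (tokens : List (List Char)) : List (List Char) :=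
  if h : i < inner.length then
    if inner[i] = '\'' ∨ inner[i] = '\"' then
      -- quote := inner[i]; start := i + 1; j := final i of the inner while loop
      extractLoop inner (scanClose inner inner[i] (i + 1) + 1)
        (tokens ++ [(inner.drop (i + 1)).take (scanClose inner inner[i] (i + 1) - (i + 1))])
    else extractLoop inner (i + 1) tokens
  else tokens
termination_by inner.length - i
decreasing_by
  · exact Nat.sub_lt_sub_left h
      (Nat.lt_succ_of_le (Nat.le_trans (Nat.le_succ i) (scanClose_ge inner inner[i] (i + 1))))
  · exact Nat.sub_succ_lt_self inner.length i h

-- for i in range(0, len(tokens), 2): ranges.append(tokens[i] + "-" + tokens[i+1])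
-- (indices are in range whenever the loop body runs with an even token count; getD is exact there)
def rangeLoop (tokens : List (List Char)) (i : Nat) (ranges : List (List Char)) : List (List Char) :=
  if h : i < tokens.length then
    rangeLoop tokens (i + 2) (ranges ++ [tokens.getD i [] ++ '-' :: tokens.getD (i + 1) []])
  else ranges
termination_by tokens.length - i
decreasing_by exact Nat.sub_lt_sub_left h (Nat.lt_add_of_pos_right (by decide))

def convert_set (def_str : String) : String :=
  let s := PySem.Str.strip def_str
  if PySem.Str.startswith s "[" && PySem.Str.endswith s "]" then
    let inner := PySem.Str.strip (PySem.Str.slice s (some 1) (some (-1)))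
    let tokens := extractLoop inner.toList 0 []
    if tokens ≠ [] then
      if 2 ≤ tokens.length ∧ tokens.length % 2 = 0 then
        String.ofList ('[' :: PySem.Chars.join [] (rangeLoop tokens 0 []) ++ [']'])
      else
        String.ofList ('[' :: PySem.Chars.join [] tokens ++ [']'])
    else
      String.ofList ('[' :: (PySem.Str.replace inner " " "").toList ++ [']'])
  else s

-- ===== PORT B =====
-- one step of the state machine: state = (tokens so far, currently open quote with its chars)
def stepTok (st : List (List Char) × Option (Char × List Char)) (c : Char) :
    List (List Char) × Option (Char × List Char) :=
  match st with
  | (toks, none) => if c = '\'' ∨ c = '\"' then (toks, some (c, [])) else (toks, none)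
  | (toks, some (q, acc)) => if c = q then (toks ++ [acc], none) else (toks, some (q, acc ++ [c]))

-- flush an unterminated final quote
def finTok (st : List (List Char) × Option (Char × List Char)) : List (List Char) :=
  match st.2 with
  | none => st.1
  | some (_, acc) => st.1 ++ [acc]

def pairRanges : List (List Char) → List (List Char)
  | a :: b :: rest => (a ++ '-' :: b) :: pairRanges rest
  | _ => []

def convert_set_alt (def_str : String) : String :=
  let s := PySem.Str.strip def_str
  if PySem.Str.startswith s "[" && PySem.Str.endswith s "]" then
    let inner := PySem.Str.strip (PySem.Str.slice s (some 1) (some (-1)))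
    let tokens := finTok (inner.toList.foldl stepTok ([], none))
    if tokens = [] then
      String.ofList ('[' :: (PySem.Str.replace inner " " "").toList ++ [']'])
    else if tokens.length % 2 = 1 then
      String.ofList ('[' :: PySem.Chars.join [] tokens ++ [']'])
    else
      String.ofList ('[' :: PySem.Chars.join [] (pairRanges tokens) ++ [']'])
  else s

-- ===== PRECONDITION & SPEC =====
def Spec_convert_set (def_str : String) (out : String) : Prop := out = convert_set_alt def_str
instance (def_str : String) (out : String) : Decidable (Spec_convert_set def_str out) := by unfold Spec_convert_set; infer_instance

-- ===== CLAIM (what is proved, stated in full; the proofs are below) =====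
def Claim_equal_convert_set : Prop := ∀ (def_str : String), Dom_convert_set def_str → Spec_convert_set def_str (convert_set def_str)

-- ===== LEMMAS AND PROOFS =====

-- folding the state machine from an OPEN state consumes chars up to the matching quote
theorem foldl_open (inner : List Char) (k : Nat) (q : Char) :
    ∀ (toks : List (List Char)) (acc : List Char),
    finTok ((inner.drop k).foldl stepTok (toks, some (q, acc)))
      = finTok ((inner.drop (scanClose inner q k + 1)).foldl stepTok
          (toks ++ [acc ++ (inner.drop k).take (scanClose inner q k - k)], none)) := by
  fun_induction scanClose inner q k with
  | case1 k h heq =>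
    intro toks acc
    simp [List.drop_eq_getElem_cons h, heq, stepTok]
  | case2 k h hne ih =>
    intro toks acc
    have hge := scanClose_ge inner q (k + 1)
    rw [List.drop_eq_getElem_cons h]
    simp only [List.foldl_cons]
    have hstep : stepTok (toks, some (q, acc)) inner[k] = (toks, some (q, acc ++ [inner[k]])) := by
      simp [stepTok, hne]
    rw [hstep, ih toks (acc ++ [inner[k]])]
    congr 3
    have h2 : scanClose inner q (k + 1) - k = (scanClose inner q (k + 1) - (k + 1)) + 1 := by omega
    rw [h2, List.take_succ_cons]
    simp
  | case3 k h =>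
    intro toks acc
    have hd : inner.drop k = [] := List.drop_eq_nil_of_le (by omega)
    have hd1 : inner.drop (k + 1) = [] := List.drop_eq_nil_of_le (by omega)
    simp [hd, hd1, finTok]

-- A's index-loop scanner equals B's one-pass state machine
theorem extractLoop_eq (inner : List Char) (i : Nat) (tokens : List (List Char)) :
    extractLoop inner i tokens = finTok ((inner.drop i).foldl stepTok (tokens, none)) := by
  fun_induction extractLoop inner i tokens with
  | case1 i toks h hq ih =>
    rw [ih, List.drop_eq_getElem_cons h]
    simp only [List.foldl_cons]
    have hstep : stepTok (toks, none) inner[i] = (toks, some (inner[i], [])) := by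
      simp [stepTok, hq]
    rw [hstep, foldl_open inner (i + 1) inner[i] toks []]
    simp
  | case2 i toks h hq ih =>
    rw [ih, List.drop_eq_getElem_cons h]
    simp only [List.foldl_cons]
    have hstep : stepTok (toks, none) inner[i] = (toks, none) := by
      simp [stepTok, hq]
    rw [hstep]
  | case3 i toks h =>
    have hd : inner.drop i = [] := List.drop_eq_nil_of_le (by omega)
    simp [hd, finTok]

-- A's range(0,len,2) pairing loop equals B's structural recursion (n is induction fuel)
theorem rangeLoop_eq (n : Nat) : ∀ (tokens : List (List Char)) (i : Nat) (ranges : List (List Char)),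
    tokens.length - i ≤ n → (tokens.length - i) % 2 = 0 →
    rangeLoop tokens i ranges = ranges ++ pairRanges (tokens.drop i) := by
  induction n with
  | zero =>
    intro ts i rs hle hpar
    rw [rangeLoop.eq_def]
    have h : ¬ i < ts.length := by omega
    have hd : ts.drop i = [] := List.drop_eq_nil_of_le (by omega)
    simp [h, hd, pairRanges]
  | succ n ih =>
    intro ts i rs hle hpar
    rw [rangeLoop.eq_def]
    by_cases h : i < ts.length
    · have h1 : i + 1 < ts.length := by omega
      rw [dif_pos h, ih ts (i + 2) _ (by omega) (by omega)]
      rw [List.drop_eq_getElem_cons h, List.drop_eq_getElem_cons h1]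
      have hd : ts.drop (i + 1 + 1) = ts.drop (i + 2) := by norm_num
      simp [pairRanges, hd, List.getD_eq_getElem?_getD, List.getElem?_eq_getElem h,
        List.getElem?_eq_getElem h1]
    · rw [dif_neg h]
      have hd : ts.drop i = [] := List.drop_eq_nil_of_le (by omega)
      simp [hd, pairRanges]

-- ===== VERDICT (by name: the statement is the Claim_ definition above) =====
theorem convert_set_spec : Claim_equal_convert_set := by
  intro def_str _
  unfold Spec_convert_set convert_set convert_set_alt
  simp only
  split
  · set inner := PySem.Str.strip (PySem.Str.slice (PySem.Str.strip def_str) (some 1) (some (-1))) with hinner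
    have htok : extractLoop inner.toList 0 [] = finTok (inner.toList.foldl stepTok ([], none)) := by
      simpa using extractLoop_eq inner.toList 0 []
    rw [htok]
    set tokens := finTok (inner.toList.foldl stepTok ([], none)) with htk
    by_cases hnil : tokens = []
    · simp [hnil]
    · simp only [ne_eq, hnil, not_false_eq_true, if_true]
      by_cases heven : 2 ≤ tokens.length ∧ tokens.length % 2 = 0
      · have hodd : ¬ tokens.length % 2 = 1 := by omega
        rw [if_pos heven, if_neg hodd]
        rw [rangeLoop_eq tokens.length tokens 0 [] (by omega) (by omega)]
        simp
      · have hne : tokens.length ≠ 0 := by simpa using hnil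
        have hodd : tokens.length % 2 = 1 := by omega
        rw [if_neg heven, if_pos hodd]
        simp
  · rfl
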